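-- pv_equiv track=rewrite | github.com/NVIDIA-NeMo/DataDesigner | packages/data-designer-engine/src/data_designer/engine/resources/agent_rollout/pi_coding_agent.py | _detect_branches
-- ===== SOURCE A (Python) =====
-- from typing import Any, ClassVar
--
-- def _detect_branches(entries: list[dict[str, Any]]) -> bool:
--     """Return whether any parent ID is referenced by more than one child.
--
--     Args:
--         entries: All session entries (excluding the session header).
--
--     Returns:
--         ``True`` if the session tree contains at least one branch point.
--     """
--     seen_parents: set[str] = set()
--     for entry in entries:
--         parent_id = entry.get("parentId")
--         if not isinstance(parent_id, str) or not parent_id: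
--             continue
--         if parent_id in seen_parents:
--             return True
--         seen_parents.add(parent_id)
--     return False
-- ===== SOURCE B (Python) =====
-- def _detect_branches(entries):
--     """Return whether any parent ID is referenced by more than one child.
--
--     Sort-then-scan: collect the valid parent ids, sort them, and report
--     whether any two adjacent ids in the sorted order are equal.
--     """
--     ids = []
--     for entry in entries:
--         parent_id = entry.get("parentId")
--         if isinstance(parent_id, str) and parent_id:
--             ids.append(parent_id)
--     ids.sort()
--     return any(a == b for a, b in zip(ids, ids[1:]))
-- ===== Notes on version B (the rewrite author's own statement) =====
-- stated objective: alternative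
-- what changed: Replaces the seen-set hash lookup with early return by collecting the parent ids, sorting them, and scanning adjacent sorted pairs for a duplicate.
import Mathlib
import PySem

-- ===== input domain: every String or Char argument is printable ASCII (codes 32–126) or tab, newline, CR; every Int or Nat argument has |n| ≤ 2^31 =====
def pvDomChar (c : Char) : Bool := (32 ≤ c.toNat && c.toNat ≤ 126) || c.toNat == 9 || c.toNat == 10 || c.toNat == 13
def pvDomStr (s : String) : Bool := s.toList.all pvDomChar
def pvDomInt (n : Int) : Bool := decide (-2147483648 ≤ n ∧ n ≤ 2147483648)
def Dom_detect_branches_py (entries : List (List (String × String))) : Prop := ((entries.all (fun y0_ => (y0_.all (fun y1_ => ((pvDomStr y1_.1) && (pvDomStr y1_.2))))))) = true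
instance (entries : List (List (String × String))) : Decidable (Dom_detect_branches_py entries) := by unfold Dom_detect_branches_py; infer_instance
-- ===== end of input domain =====

-- B replaces A's seen-set with early return by collect-sort-then-adjacent-scan
-- for a duplicate parent id (alternative algorithm, not claimed faster).

-- ===== PORT A =====
-- the for-loop with early 'return True' and the trailing 'return False'
def detectLoop : List (List (String × String)) → PySem.Set String → Bool
  | [], _ => false
  | entry :: rest, seen =>
    match (PySem.Dict.mk entry).get? "parentId" with
    | none => detectLoop rest seen
    | some pid =>
      if pid = "" then detectLoop rest seen
      else if PySem.Set.contains seen pid then true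
      else detectLoop rest (PySem.Set.add seen pid)

def detect_branches_py (entries : List (List (String × String))) : Bool :=
  detectLoop entries PySem.Set.empty

-- ===== PORT B =====
def detect_branches_py_alt (entries : List (List (String × String))) : Bool :=
  let ids : List String :=
    entries.foldl (fun acc entry =>
      match (PySem.Dict.mk entry).get? "parentId" with
      | some pid => if pid ≠ "" then acc ++ [pid] else acc
      | none => acc) []
  let s := PySem.List.sorted ids (fun x => x) false
  (s.zip s.tail).any (fun p => p.1 == p.2)

-- ===== PRECONDITION & SPEC =====
def Spec_detect_branches_py (entries : List (List (String × String))) (out : Bool) : Prop := out = detect_branches_py_alt entries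
instance (entries : List (List (String × String))) (out : Bool) : Decidable (Spec_detect_branches_py entries out) := by unfold Spec_detect_branches_py; infer_instance

-- ===== CLAIM (what is proved, stated in full; the proofs are below) =====
def Claim_equal_detect_branches_py : Prop := ∀ (entries : List (List (String × String))), Dom_detect_branches_py entries → Spec_detect_branches_py entries (detect_branches_py entries)

-- ===== LEMMAS AND PROOFS =====

-- the (non-empty, string) parent id an entry contributes, if any
def pvKey (entry : List (String × String)) : Option String :=
  match (PySem.Dict.mk entry).get? "parentId" with
  | some pid => if pid = "" then none else some pid
  | none => none

def pvIds (entries : List (List (String × String))) : List String :=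
  entries.filterMap pvKey

lemma pvFoldAppend (l : List (List (String × String))) (acc : List String) :
    l.foldl (fun acc entry =>
      match (PySem.Dict.mk entry).get? "parentId" with
      | some pid => if pid ≠ "" then acc ++ [pid] else acc
      | none => acc) acc = acc ++ pvIds l := by
  induction l generalizing acc with
  | nil => simp [pvIds]
  | cons e rest ih =>
    have hids : pvIds (e :: rest)
        = (match pvKey e with | some x => x :: pvIds rest | none => pvIds rest) := by
      unfold pvIds; rw [List.filterMap_cons]; cases pvKey e <;> rfl
    unfold pvKey at hids
    rw [List.foldl_cons]
    cases hk : (PySem.Dict.mk e).get? "parentId" with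
    | none =>
      rw [hk] at hids
      simp only [hk]
      rw [ih, hids]
    | some pid =>
      rw [hk] at hids
      simp only [hk]
      by_cases hemp : pid = ""
      · simp [hemp] at hids
        rw [ih, hids]
        simp [hemp]
      · simp [hemp] at hids
        rw [ih, hids]
        simp [hemp]

-- A returns true iff it sees a parent id twice: true iff membership of seen or a duplicate in pvIds
lemma pvA_true_iff (l : List (List (String × String))) (seen : PySem.Set String) :
    detectLoop l seen = true ↔ (∃ x ∈ pvIds l, x ∈ seen) ∨ ¬ (pvIds l).Nodup := by
  induction l generalizing seen with
  | nil => simp [detectLoop, pvIds]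
  | cons e rest ih =>
    have hids : pvIds (e :: rest)
        = (match pvKey e with | some x => x :: pvIds rest | none => pvIds rest) := by
      unfold pvIds; rw [List.filterMap_cons]; cases pvKey e <;> rfl
    cases hk : (PySem.Dict.mk e).get? "parentId" with
    | none =>
      have h0 : pvKey e = none := by unfold pvKey; rw [hk]
      rw [h0] at hids
      simp only [detectLoop, hk, hids]
      exact ih seen
    | some pid =>
      have h0 : pvKey e = if pid = "" then none else some pid := by unfold pvKey; rw [hk]
      by_cases hemp : pid = ""
      · rw [h0, if_pos hemp] at hids
        simp only [detectLoop, hk, if_pos hemp, hids]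
        exact ih seen
      · rw [h0, if_neg hemp] at hids
        rw [hids]
        by_cases hseen : pid ∈ seen
        · have hc := (PySem.Set.contains_iff seen pid).2 hseen
          have hred : detectLoop (e :: rest) seen = true := by
            simp [detectLoop, hk, hemp, hc, hseen]
          rw [hred]
          exact iff_of_true rfl (Or.inl ⟨pid, by simp, hseen⟩)
        · have hc : PySem.Set.contains seen pid = false := by
            cases h : PySem.Set.contains seen pid
            · rfl
            · exact absurd ((PySem.Set.contains_iff seen pid).1 h) hseen
          have hred : detectLoop (e :: rest) seen = detectLoop rest (PySem.Set.add seen pid) := by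
            simp [detectLoop, hk, hemp, hc, hseen]
          rw [hred, ih (PySem.Set.add seen pid)]
          constructor
          · rintro (⟨x, hx, hxs⟩ | hnd)
            · rcases (PySem.Set.mem_add seen pid x).1 hxs with h' | rfl
              · exact Or.inl ⟨x, by simp [hx], h'⟩
              · exact Or.inr (by simp [List.nodup_cons]; intro h; exact absurd hx h)
            · exact Or.inr (by simp [List.nodup_cons]; intro _; exact hnd)
          · rintro (⟨x, hx, hxs⟩ | hnd)
            · rcases List.mem_cons.1 hx with rfl | hx'
              · exact absurd hxs hseen
              · exact Or.inl ⟨x, hx', (PySem.Set.mem_add seen pid x).2 (Or.inl hxs)⟩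
            · rw [List.nodup_cons] at hnd
              push_neg at hnd
              by_cases hmem : pid ∈ pvIds rest
              · exact Or.inl ⟨pid, hmem, (PySem.Set.mem_add seen pid pid).2 (Or.inr rfl)⟩
              · exact Or.inr (hnd hmem)

-- on a (≤)-ordered list, an adjacent equal pair exists iff the list has a duplicate
lemma pvAdjDup_iff (l : List String) (h : l.Pairwise (· ≤ ·)) :
    ((l.zip l.tail).any (fun p => p.1 == p.2) = true) ↔ ¬ l.Nodup := by
  induction l with
  | nil => simp
  | cons a t iht =>
    cases t with
    | nil => simp
    | cons b r =>
      rw [List.pairwise_cons] at h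
      obtain ⟨hab, hbr⟩ := h
      have iht' := iht hbr
      simp only [List.zip_cons_cons, List.tail_cons, List.any_cons, Bool.or_eq_true, beq_iff_eq]
      by_cases hEq : a = b
      · subst hEq
        simp [List.nodup_cons]
      · have hanotin : a ∉ b :: r := by
          intro hmem
          rcases List.mem_cons.1 hmem with rfl | hmem'
          · exact hEq rfl
          · have hba : b ≤ a := (List.pairwise_cons.1 hbr).1 a hmem'
            have hab' : a ≤ b := hab b (List.mem_cons_self)
            exact hEq (le_antisymm hab' hba)
        rw [List.nodup_cons]
        simp only [hEq, false_or]
        constructor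
        · intro hadj
          intro ⟨_, hnd⟩; exact (iht'.1 hadj) hnd
        · intro hnot
          apply iht'.2
          intro hnd
          exact hnot ⟨hanotin, hnd⟩

lemma pvAlt_true_iff (entries : List (List (String × String))) :
    detect_branches_py_alt entries = true ↔ ¬ (pvIds entries).Nodup := by
  unfold detect_branches_py_alt
  simp only [pvFoldAppend entries [], List.nil_append]
  set s := PySem.List.sorted (pvIds entries) (fun x => x) false with hs
  have hperm : s.Perm (pvIds entries) := PySem.List.sorted_perm _ _ _
  have hpw : s.Pairwise (· ≤ ·) := by
    have := PySem.List.sorted_pairwise (xs := pvIds entries) (key := fun x => x)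
    simpa using this
  rw [pvAdjDup_iff s hpw, hperm.nodup_iff]

-- ===== VERDICT (by name: the statement is the Claim_ definition above) =====
theorem detect_branches_py_spec : Claim_equal_detect_branches_py := by
  intro entries _
  unfold Spec_detect_branches_py detect_branches_py
  rw [Bool.eq_iff_iff, pvA_true_iff, pvAlt_true_iff]
  simp [PySem.Set.empty]
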